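-- pv_equiv track=rewrite | github.com/AMMAAR-IC/PYTHON | InferenceEngine.py | match_fact
-- ===== SOURCE A (Python) =====
-- facts = [
--     ("parent", "john", "doe"),
--     ("parent", "doe", "jane")
-- ]
--
-- def unify(a, b, env):
--     if a == b: return env
--     if isinstance(a, str) and a.isupper():
--         env = env.copy(); env[a] = b; return env
--     if isinstance(b, str) and b.isupper():
--         env = env.copy(); env[b] = a; return env
--     return None
--
-- def match_fact(pred, args):
--     for f in facts:
--         if f[0] != pred: continue
--         env = {}
--         for fa, pa in zip(f[1:], args):
--             env = unify(pa, fa, env)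
--             if env is None: break
--         if env is not None:
--             yield env
-- ===== SOURCE B (Python) =====
-- facts = [
--     ("parent", "john", "doe"),
--     ("parent", "doe", "jane")
-- ]
--
-- FACTS_BY_PRED = {}
-- for _f in facts:
--     FACTS_BY_PRED.setdefault(_f[0], []).append(_f[1:])
--
-- def _bind(args, fargs):
--     env = {}
--     for pa, fa in zip(args, fargs):
--         if pa == fa:
--             continue
--         if pa.isupper():
--             env[pa] = fa
--         elif fa.isupper():
--             env[fa] = pa
--         else:
--             return None
--     return env
--
-- def match_fact(pred, args):
--     out = []
--     for fargs in FACTS_BY_PRED.get(pred, ()):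
--         env = _bind(args, fargs)
--         if env is not None:
--             out.append(env)
--     return out
-- ===== Notes on version B (the rewrite author's own statement) =====
-- stated objective: alternative
-- what changed: B precomputes a dict grouping fact argument tuples by predicate so matching looks up the group instead of scanning and filtering all facts, and replaces the None-threading unify helper (which copies the env on every binding) with a single in-place binding pass per fact that returns early on mismatch; B returns a list instead of a generator.
import Mathlib
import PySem

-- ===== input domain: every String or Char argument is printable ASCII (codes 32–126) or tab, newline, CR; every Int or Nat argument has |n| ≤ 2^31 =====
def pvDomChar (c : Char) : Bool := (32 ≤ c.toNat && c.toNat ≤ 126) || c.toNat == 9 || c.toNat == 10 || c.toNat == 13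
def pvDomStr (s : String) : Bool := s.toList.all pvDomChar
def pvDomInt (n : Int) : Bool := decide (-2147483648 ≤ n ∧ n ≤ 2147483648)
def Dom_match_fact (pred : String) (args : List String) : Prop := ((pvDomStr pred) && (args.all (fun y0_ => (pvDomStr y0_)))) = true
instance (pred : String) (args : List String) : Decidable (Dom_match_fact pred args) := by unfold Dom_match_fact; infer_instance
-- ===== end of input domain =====

-- B indexes the fact argument tuples by predicate in a dict built once and binds variables in one
-- early-returning pass per fact (no env copies, no None threading); same results as A's full scan.
-- A is a generator; equivalence is about the materialised list of yielded envs.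

-- ===== PORT A =====
-- hand port of Python str.isupper(): exact on the printable-ASCII (+ tab/newline/CR) domain,
-- where the cased characters are exactly the letters
def pyIsupper (s : String) : Bool :=
  s.toList.any PySem.Str.isalpha && s.toList.all (fun c => !PySem.Str.islower c)

def pvFactsA : List (String × String × String) :=
  [("parent", "john", "doe"), ("parent", "doe", "jane")]

def unifyA (a b : String) (env : PySem.Dict String String) :
    Option (PySem.Dict String String) :=
  if a == b then some env
  else if pyIsupper a then some (env.insert a b)
  else if pyIsupper b then some (env.insert b a)
  else none

def match_fact (pred : String) (args : List String) : List (List (String × String)) :=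
  pvFactsA.foldl (fun acc f =>
    if f.1 != pred then acc
    else
      -- for fa, pa in zip(f[1:], args): env = unify(pa, fa, env); break on None
      match (([f.2.1, f.2.2]).zip args).foldl
          (fun o p => o.bind (fun e => unifyA p.2 p.1 e)) (some PySem.Dict.empty) with
      | some env => acc ++ [env.items]
      | none => acc) []

-- ===== PORT B =====
def pvFactsIndex : PySem.Dict String (List (List String)) :=
  pvFactsA.foldl (fun d f => d.insert f.1 (d.getD f.1 [] ++ [[f.2.1, f.2.2]]))
    PySem.Dict.empty

def bindB (env : PySem.Dict String String) :
    List (String × String) → Option (PySem.Dict String String)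
  | [] => some env
  | (pa, fa) :: rest =>
      if pa == fa then bindB env rest
      else if pyIsupper pa then bindB (env.insert pa fa) rest
      else if pyIsupper fa then bindB (env.insert fa pa) rest
      else none

def match_fact_alt (pred : String) (args : List String) : List (List (String × String)) :=
  (pvFactsIndex.getD pred []).filterMap
    (fun fargs => (bindB PySem.Dict.empty (args.zip fargs)).map (·.items))

-- ===== PRECONDITION & SPEC =====
def Spec_match_fact (pred : String) (args : List String) (out : List (List (String × String))) : Prop := out = match_fact_alt pred args
instance (pred : String) (args : List String) (out : List (List (String × String))) : Decidable (Spec_match_fact pred args out) := by unfold Spec_match_fact; infer_instance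

-- ===== CLAIM (what is proved, stated in full; the proofs are below) =====
def Claim_equal_match_fact : Prop := ∀ (pred : String) (args : List String), Dom_match_fact pred args → Spec_match_fact pred args (match_fact pred args)

-- ===== LEMMAS AND PROOFS =====
lemma foldl_bind_none (l : List (String × String)) :
    l.foldl (fun o p => o.bind (fun e => unifyA p.2 p.1 e))
      (none : Option (PySem.Dict String String)) = none := by
  induction l with
  | nil => rfl
  | cons h t ih => simpa using ih

lemma bind_eq (fas pas : List String) (env : PySem.Dict String String) :
    (fas.zip pas).foldl (fun o p => o.bind (fun e => unifyA p.2 p.1 e)) (some env)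
      = bindB env (pas.zip fas) := by
  induction fas generalizing pas env with
  | nil => cases pas <;> rfl
  | cons fa fas ih =>
    cases pas with
    | nil => rfl
    | cons pa pas =>
      simp only [List.zip_cons_cons, List.foldl_cons, bindB, Option.bind, unifyA]
      split_ifs with h1 h2 h3
      · exact ih pas env
      · exact ih pas _
      · exact ih pas _
      · exact foldl_bind_none _

-- ===== VERDICT (by name: the statement is the Claim_ definition above) =====
theorem match_fact_spec : Claim_equal_match_fact := by
  intro pred args _
  unfold Spec_match_fact match_fact match_fact_alt
  have hidx : pvFactsIndex
      = PySem.Dict.mk [("parent", [["john", "doe"], ["doe", "jane"]])] := by decide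
  by_cases h : pred = "parent"
  · subst h
    simp only [pvFactsA, List.foldl_cons, List.foldl_nil, hidx,
      PySem.Dict.getD, PySem.Dict.get?_mk_cons, beq_self_eq_true, bne_self_eq_false,
      Bool.false_eq_true, if_false, if_true]
    rw [bind_eq ["john", "doe"] args PySem.Dict.empty,
        bind_eq ["doe", "jane"] args PySem.Dict.empty]
    cases h1 : bindB PySem.Dict.empty (args.zip ["john", "doe"]) <;>
      cases h2 : bindB PySem.Dict.empty (args.zip ["doe", "jane"]) <;>
        simp [List.filterMap, h1, h2]
  · have hb : ("parent" == pred) = false := by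
      simpa using fun hh => h hh.symm
    simp [pvFactsA, hidx, PySem.Dict.getD, PySem.Dict.get?_mk_cons, PySem.Dict.get?, hb, Ne.symm h]
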